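-- pv_equiv track=rewrite | github.com/TheTeodora22/QRCode-Interpreter | main.py | find_horizontal_finder_patterns
-- ===== SOURCE A (Python) =====
-- def find_horizontal_finder_patterns(matrix):
-- #TE ROG REPARA FUNCTIA ASTA, PT CA NU SE CALCULEAZA CORECT :(((((((((((((
--     count = 0
--     for linie in matrix:
--         #asta-i pt cele din mijloc
--         for i in range(len(linie)-10):
--             if linie[i:i+11] == [0,0,0,0,1,0,1,1,1,0,1] or linie[i:i+11] == [1,0,1,1,1,0,1,0,0,0,0]:
--                 count+=1
--         #asta-i pt cele din marginea stanga
--         if linie[:7]==[1,0,1,1,1,0,1]: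
--             count+=1
--         #asta-i pt cele din marginea dreapta
--         if linie[len(linie)-7:] == [1,0,1,1,1,0,1]:
--             count+=1
--
--     return count*40
-- ===== SOURCE B (Python) =====
-- # Two-phase re-implementation: find the positions of the 7-cell finder core
-- # F = [1,0,1,1,1,0,1] per row, then count four-zero contexts on each side,
-- # plus the two row-edge checks; same total, times 40.
-- FINDER = [1, 0, 1, 1, 1, 0, 1]
-- ZEROS = [0, 0, 0, 0]
--
-- def find_horizontal_finder_patterns(matrix):
--     count = 0
--     for linie in matrix:
--         n = len(linie)
--         positions = [p for p in range(n - 6) if linie[p:p+7] == FINDER]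
--         for p in positions:
--             if p >= 4 and linie[p-4:p] == ZEROS:
--                 count += 1
--             if p + 11 <= n and linie[p+7:p+11] == ZEROS:
--                 count += 1
--         if linie[:7] == FINDER:
--             count += 1
--         if linie[n-7:] == FINDER:
--             count += 1
--     return count * 40
-- ===== Notes on version B (the rewrite author's own statement) =====
-- stated objective: alternative
-- what changed: Instead of sliding an 11-wide window and comparing it against the two zero-padded patterns, B first collects the positions of the 7-cell finder core [1,0,1,1,1,0,1] per row and then counts four-zero contexts to its left and right, keeping the two edge checks; same total times 40.
import Mathlib
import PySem

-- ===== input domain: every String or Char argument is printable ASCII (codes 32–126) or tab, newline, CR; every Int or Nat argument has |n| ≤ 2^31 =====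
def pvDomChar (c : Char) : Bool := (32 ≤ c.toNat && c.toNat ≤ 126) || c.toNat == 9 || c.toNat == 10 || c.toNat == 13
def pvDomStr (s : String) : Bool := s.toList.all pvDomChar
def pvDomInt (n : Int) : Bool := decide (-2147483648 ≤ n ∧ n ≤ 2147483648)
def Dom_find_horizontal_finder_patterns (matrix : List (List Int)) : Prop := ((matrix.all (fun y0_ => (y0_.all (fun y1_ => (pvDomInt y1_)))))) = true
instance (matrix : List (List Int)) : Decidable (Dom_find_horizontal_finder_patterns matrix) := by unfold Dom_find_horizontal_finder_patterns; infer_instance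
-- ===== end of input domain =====

-- B re-implements A by locating the 7-cell finder core per row and then counting
-- four-zero contexts on each side (an alternative decomposition, same cost).

-- ===== PORT A =====
def find_horizontal_finder_patterns (matrix : List (List Int)) : Int :=
  (matrix.foldl (fun count linie =>
    -- for i in range(len(linie)-10): if linie[i:i+11] == P1 or linie[i:i+11] == P2: count += 1
    let count := (PySem.List.pyRange 0 ((linie.length : Int) - 10)).foldl
      (fun count i =>
        if PySem.List.slice linie (some i) (some (i + 11)) = [0,0,0,0,1,0,1,1,1,0,1] ∨
           PySem.List.slice linie (some i) (some (i + 11)) = [1,0,1,1,1,0,1,0,0,0,0] then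
          count + 1 else count) count
    -- if linie[:7] == [1,0,1,1,1,0,1]: count += 1
    let count := if PySem.List.slice linie none (some 7) = [1,0,1,1,1,0,1] then count + 1 else count
    -- if linie[len(linie)-7:] == [1,0,1,1,1,0,1]: count += 1
    let count := if PySem.List.slice linie (some ((linie.length : Int) - 7)) none = [1,0,1,1,1,0,1] then count + 1 else count
    count) 0) * 40

-- ===== PORT B =====
def pvFinder : List Int := [1, 0, 1, 1, 1, 0, 1]
def pvZeros : List Int := [0, 0, 0, 0]

def find_horizontal_finder_patterns_alt (matrix : List (List Int)) : Int :=
  (matrix.foldl (fun count linie =>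
    let n : Int := linie.length
    -- positions = [p for p in range(n - 6) if linie[p:p+7] == FINDER]
    let positions := (PySem.List.pyRange 0 (n - 6)).filter
      (fun p => PySem.List.slice linie (some p) (some (p + 7)) == pvFinder)
    let count := positions.foldl (fun count p =>
      let count := if 4 ≤ p ∧ PySem.List.slice linie (some (p - 4)) (some p) = pvZeros then count + 1 else count
      let count := if p + 11 ≤ n ∧ PySem.List.slice linie (some (p + 7)) (some (p + 11)) = pvZeros then count + 1 else count
      count) count
    let count := if PySem.List.slice linie none (some 7) = pvFinder then count + 1 else count
    let count := if PySem.List.slice linie (some (n - 7)) none = pvFinder then count + 1 else count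
    count) 0) * 40

-- ===== PRECONDITION & SPEC =====
def Spec_find_horizontal_finder_patterns (matrix : List (List Int)) (out : Int) : Prop := out = find_horizontal_finder_patterns_alt matrix
instance (matrix : List (List Int)) (out : Int) : Decidable (Spec_find_horizontal_finder_patterns matrix out) := by unfold Spec_find_horizontal_finder_patterns; infer_instance

-- ===== CLAIM (what is proved, stated in full; the proofs are below) =====
def Claim_equal_find_horizontal_finder_patterns : Prop := ∀ (matrix : List (List Int)), Dom_find_horizontal_finder_patterns matrix → Spec_find_horizontal_finder_patterns matrix (find_horizontal_finder_patterns matrix)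

-- ===== LEMMAS AND PROOFS =====

theorem pv_foldl_ite_prop {α : Type} (P : α → Prop) [DecidablePred P] (l : List α) (a : Int) :
    l.foldl (fun c x => if P x then c + 1 else c) a
      = a + (l.map (fun x => if P x then (1 : Int) else 0)).sum := by
  have h1 := PySem.List.foldl_count_if (fun x => decide (P x)) l a
  have h2 := PySem.List.sum_map_ite_one_zero (fun x => decide (P x)) l
  simp only [decide_eq_true_eq] at h1 h2
  rw [h1, h2]

theorem pv_sum_map_filter {α : Type} (q : α → Bool) (g : α → Int) (l : List α) :
    ((l.filter q).map g).sum = (l.map (fun x => if q x then g x else 0)).sum := by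
  induction l with
  | nil => rfl
  | cons x xs ih => by_cases h : q x <;> simp [h, ih]

theorem pv_split_take {l : List Int} {k a b : ℕ} {X Y : List Int}
    (hX : X.length = a) (hY : Y.length = b) :
    (l.drop k).take (a + b) = X ++ Y ↔
      ((l.drop k).take a = X ∧ (l.drop (k + a)).take b = Y) := by
  rw [List.take_add, ← List.drop_drop]
  constructor
  · intro h
    have hXa : (List.take a (l.drop k)).length = X.length := by
      have hlen := congrArg List.length h
      simp only [List.length_append, List.length_take, hX, hY] at hlen
      simp only [List.length_take, hX]
      omega
    exact List.append_inj h hXa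
  · rintro ⟨h1, h2⟩; rw [h1, h2]

theorem pv_w_eq_P1 (l : List Int) (k : ℕ) :
    (l.drop k).take 11 = [0,0,0,0,1,0,1,1,1,0,1] ↔
      ((l.drop k).take 4 = pvZeros ∧ (l.drop (k + 4)).take 7 = pvFinder) := by
  have h : ([0,0,0,0,1,0,1,1,1,0,1] : List Int) = pvZeros ++ pvFinder := by rfl
  rw [h, show (11 : ℕ) = 4 + 7 from rfl]
  exact pv_split_take rfl rfl

theorem pv_w_eq_P2 (l : List Int) (k : ℕ) :
    (l.drop k).take 11 = [1,0,1,1,1,0,1,0,0,0,0] ↔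
      ((l.drop k).take 7 = pvFinder ∧ (l.drop (k + 7)).take 4 = pvZeros) := by
  have h : ([1,0,1,1,1,0,1,0,0,0,0] : List Int) = pvFinder ++ pvZeros := by rfl
  rw [h, show (11 : ℕ) = 7 + 4 from rfl]
  exact pv_split_take rfl rfl

theorem pv_slice_add (l : List Int) (k m : ℕ) :
    PySem.List.slice l (some ((k : Int))) (some ((k : Int) + (m : Int))) = (l.drop k).take m :=
  PySem.List.slice_natCast_add l k m

theorem pv_slice11 (l : List Int) (k : ℕ) :
    PySem.List.slice l (some ((k : Int))) (some ((k : Int) + 11)) = (l.drop k).take 11 := by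
  rw [show ((k : Int) + 11) = ((k : Int) + ((11 : ℕ) : Int)) by push_cast; ring]
  exact pv_slice_add l k 11

theorem pv_slice7 (l : List Int) (k : ℕ) :
    PySem.List.slice l (some ((k : Int))) (some ((k : Int) + 7)) = (l.drop k).take 7 := by
  rw [show ((k : Int) + 7) = ((k : Int) + ((7 : ℕ) : Int)) by push_cast; ring]
  exact pv_slice_add l k 7

theorem pv_slice_sub4 (l : List Int) (k : ℕ) (h : 4 ≤ k) :
    PySem.List.slice l (some ((k : Int) - 4)) (some ((k : Int))) = (l.drop (k - 4)).take 4 := by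
  rw [show ((k : Int) - 4) = (((k - 4 : ℕ) : Int)) by omega,
      show ((k : Int)) = (((k : ℕ) : Int)) by rfl,
      PySem.List.slice_natCast]
  congr 1
  omega

theorem pv_slice_p7_11 (l : List Int) (k : ℕ) :
    PySem.List.slice l (some ((k : Int) + 7)) (some ((k : Int) + 11)) = (l.drop (k + 7)).take 4 := by
  rw [show ((k : Int) + 7) = (((k + 7 : ℕ) : Int)) by push_cast; ring,
      show ((k : Int) + 11) = (((k + 11 : ℕ) : Int)) by push_cast; ring,
      PySem.List.slice_natCast]
  congr 1
  omega

theorem pv_sum_map_zero {f : ℕ → Int} {r : List ℕ} (h : ∀ k ∈ r, f k = 0) : (r.map f).sum = 0 :=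
  List.sum_eq_zero (fun x hx => by
    obtain ⟨k, hk, rfl⟩ := List.mem_map.1 hx
    exact h k hk)

theorem pv_mid_eq (l : List Int) (c : Int) :
    (PySem.List.pyRange 0 ((l.length : Int) - 10)).foldl
      (fun count i =>
        if PySem.List.slice l (some i) (some (i + 11)) = [0,0,0,0,1,0,1,1,1,0,1] ∨
           PySem.List.slice l (some i) (some (i + 11)) = [1,0,1,1,1,0,1,0,0,0,0] then
          count + 1 else count) c
    = ((PySem.List.pyRange 0 ((l.length : Int) - 6)).filter
        (fun p => PySem.List.slice l (some p) (some (p + 7)) == pvFinder)).foldl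
      (fun count p =>
        let count := if 4 ≤ p ∧ PySem.List.slice l (some (p - 4)) (some p) = pvZeros then count + 1 else count
        let count := if p + 11 ≤ (l.length : Int) ∧ PySem.List.slice l (some (p + 7)) (some (p + 11)) = pvZeros then count + 1 else count
        count) c := by
  -- abbreviations
  set n := l.length with hn
  -- LHS to a 0/1 sum over List.range
  rw [PySem.List.pyRange_one 0 ((n : Int) - 10)]
  simp only [zero_add, sub_zero, List.foldl_map]
  rw [pv_foldl_ite_prop]
  -- RHS: body to an additive fold, filter to guarded sum
  rw [PySem.List.pyRange_one 0 ((n : Int) - 6)]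
  simp only [zero_add, sub_zero, List.filter_map, List.foldl_map, Function.comp_def]
  rw [show (fun (count : Int) (k : ℕ) =>
        let count := if 4 ≤ ((k : Int)) ∧ PySem.List.slice l (some ((k : Int) - 4)) (some ((k : Int))) = pvZeros then count + 1 else count
        let count := if (k : Int) + 11 ≤ (n : Int) ∧ PySem.List.slice l (some ((k : Int) + 7)) (some ((k : Int) + 11)) = pvZeros then count + 1 else count
        count)
      = (fun (count : Int) (k : ℕ) => count +
          ((if 4 ≤ ((k : Int)) ∧ PySem.List.slice l (some ((k : Int) - 4)) (some ((k : Int))) = pvZeros then (1:Int) else 0) +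
           (if (k : Int) + 11 ≤ (n : Int) ∧ PySem.List.slice l (some ((k : Int) + 7)) (some ((k : Int) + 11)) = pvZeros then (1:Int) else 0))) by
        funext count k
        simp only []
        split_ifs <;> ring]
  rw [PySem.List.foldl_add, pv_sum_map_filter]
  congr 1
  -- now pure sums; abbreviate the ℕ-level indicator terms
  have hA : (List.map (fun k : ℕ =>
        if PySem.List.slice l (some ((k : Int))) (some ((k : Int) + 11)) = [0,0,0,0,1,0,1,1,1,0,1] ∨
           PySem.List.slice l (some ((k : Int))) (some ((k : Int) + 11)) = [1,0,1,1,1,0,1,0,0,0,0] then (1:Int) else 0)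
        (List.range ((n : Int) - 10).toNat))
      = List.map (fun k : ℕ =>
          (if ((l.drop k).take 4 = pvZeros ∧ (l.drop (k + 4)).take 7 = pvFinder) then (1:Int) else 0) +
          (if ((l.drop k).take 7 = pvFinder ∧ (l.drop (k + 7)).take 4 = pvZeros) then (1:Int) else 0))
        (List.range ((n : Int) - 10).toNat) := by
    apply List.map_congr_left
    intro k _
    rw [pv_slice11]
    by_cases h1 : (l.drop k).take 11 = [0,0,0,0,1,0,1,1,1,0,1] <;>
      by_cases h2 : (l.drop k).take 11 = [1,0,1,1,1,0,1,0,0,0,0]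
    · rw [h1] at h2; exact absurd h2 (by decide)
    · rw [if_pos (Or.inl h1), if_pos ((pv_w_eq_P1 l k).1 h1),
          if_neg (fun hc => h2 ((pv_w_eq_P2 l k).2 hc))]
      norm_num
    · rw [if_pos (Or.inr h2), if_neg (fun hc => h1 ((pv_w_eq_P1 l k).2 hc)),
          if_pos ((pv_w_eq_P2 l k).1 h2)]
      norm_num
    · rw [if_neg (fun hc => hc.elim h1 h2), if_neg (fun hc => h1 ((pv_w_eq_P1 l k).2 hc)),
          if_neg (fun hc => h2 ((pv_w_eq_P2 l k).2 hc))]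
      norm_num
  rw [hA]
  have hB : (List.map (fun k : ℕ =>
        if (PySem.List.slice l (some ((k : Int))) (some ((k : Int) + 7)) == pvFinder) then
          ((if 4 ≤ ((k : Int)) ∧ PySem.List.slice l (some ((k : Int) - 4)) (some ((k : Int))) = pvZeros then (1:Int) else 0) +
           (if (k : Int) + 11 ≤ (n : Int) ∧ PySem.List.slice l (some ((k : Int) + 7)) (some ((k : Int) + 11)) = pvZeros then (1:Int) else 0))
        else 0)
        (List.range ((n : Int) - 6).toNat))
      = List.map (fun k : ℕ =>
          (if ((l.drop k).take 7 = pvFinder ∧ 4 ≤ k ∧ (l.drop (k - 4)).take 4 = pvZeros) then (1:Int) else 0) +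
          (if ((l.drop k).take 7 = pvFinder ∧ k + 11 ≤ n ∧ (l.drop (k + 7)).take 4 = pvZeros) then (1:Int) else 0))
        (List.range ((n : Int) - 6).toNat) := by
    apply List.map_congr_left
    intro k _
    rw [pv_slice7, pv_slice_p7_11]
    by_cases hF : (l.drop k).take 7 = pvFinder
    · simp only [hF, beq_self_eq_true, if_true, true_and]
      congr 1
      · by_cases h4 : 4 ≤ k
        · rw [pv_slice_sub4 l k h4]
          apply if_congr _ rfl rfl
          constructor
          · rintro ⟨_, h⟩; exact ⟨h4, h⟩
          · rintro ⟨_, h⟩; exact ⟨by exact_mod_cast Nat.cast_le.2 h4, h⟩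
        · rw [if_neg, if_neg]
          · rintro ⟨h, _⟩; omega
          · rintro ⟨h, _⟩; exact h4 (by exact_mod_cast h)
      · apply if_congr _ rfl rfl
        constructor
        · rintro ⟨h, hz⟩; exact ⟨by exact_mod_cast h, hz⟩
        · rintro ⟨h, hz⟩; exact ⟨by exact_mod_cast h, hz⟩
    · have : ((l.drop k).take 7 == pvFinder) = false := by
        simp [hF]
      simp [this, hF]
  rw [hB]
  rw [PySem.List.sum_map_add_int, PySem.List.sum_map_add_int]
  -- two sub-sum equalities
  by_cases hn10 : 10 ≤ n
  · have hN : ((n : Int) - 10).toNat = n - 10 := by omega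
    have hM : ((n : Int) - 6).toNat = n - 6 := by omega
    have hM4 : n - 6 = 4 + (n - 10) := by omega
    have hM4' : n - 6 = (n - 10) + 4 := by omega
    congr 1
    -- P1 part
    · rw [hN, hM, hM4, List.range_add, List.map_append, List.sum_append, List.map_map]
      rw [pv_sum_map_zero (f := fun k : ℕ =>
            (if ((l.drop k).take 7 = pvFinder ∧ 4 ≤ k ∧ (l.drop (k - 4)).take 4 = pvZeros) then (1:Int) else 0))
          (by intro k hk
              rw [List.mem_range] at hk
              simp only [ite_eq_right_iff]
              rintro ⟨_, h4, _⟩; omega), zero_add]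
      simp only [Function.comp_def]
      apply congrArg
      apply List.map_congr_left
      intro i _
      apply if_congr _ rfl rfl
      constructor
      · rintro ⟨hz, hf⟩
        refine ⟨by rw [show 4 + i = i + 4 by omega]; exact hf, by omega, by simpa [show 4 + i - 4 = i by omega] using hz⟩
      · rintro ⟨hf, _, hz⟩
        exact ⟨by simpa [show 4 + i - 4 = i by omega] using hz, by rw [show i + 4 = 4 + i by omega]; exact hf⟩
    -- P2 part
    · rw [hN, hM, hM4', List.range_add, List.map_append, List.sum_append, List.map_map]
      have htail : (List.map ((fun k : ℕ =>
            if ((l.drop k).take 7 = pvFinder ∧ k + 11 ≤ n ∧ (l.drop (k + 7)).take 4 = pvZeros) then (1:Int) else 0)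
              ∘ (fun x => n - 10 + x)) (List.range 4)).sum = 0 := by
        apply pv_sum_map_zero
        intro i hi
        rw [List.mem_range] at hi
        simp only [Function.comp_apply, ite_eq_right_iff]
        rintro ⟨_, h11, _⟩; omega
      rw [htail, add_zero]
      apply congrArg
      apply List.map_congr_left
      intro i hi
      rw [List.mem_range] at hi
      apply if_congr _ rfl rfl
      constructor
      · rintro ⟨hf, hz⟩; exact ⟨hf, by omega, hz⟩
      · rintro ⟨hf, _, hz⟩; exact ⟨hf, hz⟩
  · have hN : ((n : Int) - 10).toNat = 0 := by omega
    rw [hN]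
    simp only [List.range_zero, List.map_nil, List.sum_nil, zero_add]
    rw [pv_sum_map_zero (by
          intro k hk
          rw [List.mem_range] at hk
          simp only [ite_eq_right_iff]
          rintro ⟨_, h4, _⟩
          omega),
        pv_sum_map_zero (by
          intro k hk
          rw [List.mem_range] at hk
          simp only [ite_eq_right_iff]
          rintro ⟨_, h11, _⟩
          omega), add_zero]

-- the per-row update functions of the two ports agree
theorem pv_row_eq (c : Int) (l : List Int) :
    (let count := (PySem.List.pyRange 0 ((l.length : Int) - 10)).foldl
      (fun count i =>
        if PySem.List.slice l (some i) (some (i + 11)) = [0,0,0,0,1,0,1,1,1,0,1] ∨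
           PySem.List.slice l (some i) (some (i + 11)) = [1,0,1,1,1,0,1,0,0,0,0] then
          count + 1 else count) c
     let count := if PySem.List.slice l none (some 7) = [1,0,1,1,1,0,1] then count + 1 else count
     let count := if PySem.List.slice l (some ((l.length : Int) - 7)) none = [1,0,1,1,1,0,1] then count + 1 else count
     count)
    = (let n : Int := l.length
       let positions := (PySem.List.pyRange 0 (n - 6)).filter
         (fun p => PySem.List.slice l (some p) (some (p + 7)) == pvFinder)
       let count := positions.foldl (fun count p =>
         let count := if 4 ≤ p ∧ PySem.List.slice l (some (p - 4)) (some p) = pvZeros then count + 1 else count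
         let count := if p + 11 ≤ n ∧ PySem.List.slice l (some (p + 7)) (some (p + 11)) = pvZeros then count + 1 else count
         count) c
       let count := if PySem.List.slice l none (some 7) = pvFinder then count + 1 else count
       let count := if PySem.List.slice l (some (n - 7)) none = pvFinder then count + 1 else count
       count) := by
  have h := pv_mid_eq l c
  simp only [pvFinder] at h ⊢
  rw [h]

-- ===== VERDICT (by name: the statement is the Claim_ definition above) =====
theorem find_horizontal_finder_patterns_spec : Claim_equal_find_horizontal_finder_patterns := by
  intro matrix _
  unfold Spec_find_horizontal_finder_patterns
  unfold find_horizontal_finder_patterns find_horizontal_finder_patterns_alt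
  congr 1
  apply congrArg (fun f => List.foldl f 0 matrix)
  funext c l
  exact pv_row_eq c l
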